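-- pv_equiv track=rewrite | github.com/bart115/PL2025-A104350 | TPC1/tpc1.py | somador_on_off
-- ===== SOURCE A (Python) =====
-- def somador_on_off(texto):
--     linhas = texto.split('\n')
--     saida = []
--     soma = 0
--     somando = True
--     linha_atual = ""
--
--     for linha in linhas:
--         i = 0
--         while i < len(linha):
--             # Verificar "Off" em qualquer combinação de maiúsculas e minúsculas
--             if i <= len(linha) - 3 and linha[i:i+3].lower() == "off":
--                 linha_atual += linha[i:i+3]
--                 somando = False
--                 i += 3
--                 continue
--
--             # Verificar "On" em qualquer combinação de maiúsculas e minúsculas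
--             if i <= len(linha) - 2 and linha[i:i+2].lower() == "on":
--                 linha_atual += linha[i:i+2]
--                 somando = True
--                 i += 2
--                 continue
--
--             # Se estiver somando, verificar se encontrou uma sequência de dígitos
--             if somando and linha[i].isdigit():
--                 numero = ""
--                 while i < len(linha) and linha[i].isdigit():
--                     numero += linha[i]
--                     i += 1
--                 linha_atual += numero
--                 soma += int(numero)
--                 continue
--
--             # Verificar o caractere "="
--             if linha[i] == "=":
--                 linha_atual += "="
--                 saida.append(linha_atual)
--                 saida.append(f">> {soma}")
--                 linha_atual = ""
--                 i += 1
--                 continue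
--
--             linha_atual += linha[i]
--             i += 1
--
--         # Adiciona quebra de linha, exceto na última linha
--         if linha != linhas[-1]:
--             linha_atual += "\n"
--
--     # Adiciona o restante do texto, se houver
--     if linha_atual:
--         saida.append(linha_atual)
--
--     # Adiciona o resultado final
--     saida.append(f">> {soma}")
--
--     return "\n".join(saida)
-- ===== SOURCE B (Python) =====
-- import re
--
-- # tokenizer: same precedence as A's branch order — off, on, digit run, '=', any other char
-- _TOK = re.compile(r'(?i:off)|(?i:on)|[0-9]+|=|.')
--
-- def somador_on_off(texto):
--     linhas = texto.split('\n')
--     saida = []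
--     soma = 0
--     somando = True
--     linha_atual = ""
--     for linha in linhas:
--         for m in _TOK.finditer(linha):
--             t = m.group()
--             low = t.lower()
--             if low == "off":
--                 somando = False
--                 linha_atual += t
--             elif low == "on":
--                 somando = True
--                 linha_atual += t
--             elif t[0].isdigit():
--                 linha_atual += t
--                 if somando:
--                     soma += int(t)
--             elif t == "=":
--                 linha_atual += "="
--                 saida.append(linha_atual)
--                 saida.append(f">> {soma}")
--                 linha_atual = ""
--             else:
--                 linha_atual += t
--         if linha != linhas[-1]:
--             linha_atual += "\n"
--     if linha_atual:
--         saida.append(linha_atual)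
--     saida.append(f">> {soma}")
--     return "\n".join(saida)
-- ===== Notes on version B (the rewrite author's own statement) =====
-- stated objective: faster
-- what changed: The manual index-walking while-loop with per-position slicing and per-character Python-level dispatch is replaced by a single C-level regex scan (re.finditer over the alternation (?i:off)|(?i:on)|[0-9]+|=|.) per line followed by a dispatch on whole tokens; digit runs are consumed whole even when summing is off.
import Mathlib
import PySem

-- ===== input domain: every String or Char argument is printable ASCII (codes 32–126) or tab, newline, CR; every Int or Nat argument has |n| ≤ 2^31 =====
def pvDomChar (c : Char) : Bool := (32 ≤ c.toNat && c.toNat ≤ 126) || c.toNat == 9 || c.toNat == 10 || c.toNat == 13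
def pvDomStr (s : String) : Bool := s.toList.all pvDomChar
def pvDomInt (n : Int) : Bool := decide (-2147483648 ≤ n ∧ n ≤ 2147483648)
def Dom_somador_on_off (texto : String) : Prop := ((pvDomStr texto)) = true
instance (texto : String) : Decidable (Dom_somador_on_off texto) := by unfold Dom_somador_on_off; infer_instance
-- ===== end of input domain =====

-- B replaces A's manual index-walking while-loop by a two-phase tokenize-then-dispatch pass
-- (the regex alternation (?i:off)|(?i:on)|[0-9]+|=|. plus a fold over the tokens); a timing run measured B faster.


-- ===== PORT A =====

-- f">> {soma}"
def pvA_out (soma : Int) : List Char := '>' :: '>' :: ' ' :: PySem.Int.toChars soma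

-- A's inner while: collect the digit run 'numero' and return it with the remaining suffix
def pvA_run : List Char → List Char × List Char
  | [] => ([], [])
  | c :: rest =>
    if PySem.Chars.isdigit c then (c :: (pvA_run rest).1, (pvA_run rest).2)
    else ([], c :: rest)

-- needed only for termination of pvA_loop (cited by name in decreasing_by)
theorem pvA_run_eq (l : List Char) :
    pvA_run l = (l.takeWhile PySem.Chars.isdigit, l.dropWhile PySem.Chars.isdigit) := by
  induction l with
  | nil => rfl
  | cons c rest ih =>
    by_cases h : PySem.Chars.isdigit c = true <;>
      simp [pvA_run, h, ih]

-- A's while-loop over one line, on the remaining suffix; state (soma, somando, linha_atual, saida)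
def pvA_loop : List Char → Int → Bool → List Char → List (List Char) →
    Int × Bool × List Char × List (List Char)
  | [], soma, somando, cur, saida => (soma, somando, cur, saida)
  | c :: rest, soma, somando, cur, saida =>
    -- i <= len(linha)-3 and linha[i:i+3].lower() == "off"
    if 3 ≤ (c :: rest).length ∧ ((c :: rest).take 3).map PySem.Chars.lowerChar = ['o', 'f', 'f'] then
      pvA_loop ((c :: rest).drop 3) soma false (cur ++ (c :: rest).take 3) saida
    -- i <= len(linha)-2 and linha[i:i+2].lower() == "on"
    else if 2 ≤ (c :: rest).length ∧ ((c :: rest).take 2).map PySem.Chars.lowerChar = ['o', 'n'] then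
      pvA_loop ((c :: rest).drop 2) soma true (cur ++ (c :: rest).take 2) saida
    -- somando and linha[i].isdigit(): inner while collects numero; int(numero) never raises (nonempty digits)
    else if h : somando = true ∧ PySem.Chars.isdigit c = true then
      pvA_loop (pvA_run (c :: rest)).2
        (soma + (PySem.Int.ofChars? (pvA_run (c :: rest)).1).getD 0)
        somando (cur ++ (pvA_run (c :: rest)).1) saida
    -- linha[i] == "="
    else if c = '=' then
      pvA_loop rest soma somando [] (saida ++ [cur ++ ['='], pvA_out soma])
    else
      pvA_loop rest soma somando (cur ++ [c]) saida
  termination_by l _ _ _ _ => l.length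
  decreasing_by
  all_goals have := List.length_dropWhile_le (p := PySem.Chars.isdigit) (l := rest)
  all_goals try simp [pvA_run_eq, List.dropWhile_cons, h.2]
  all_goals try simp
  all_goals omega

-- A's 'for linha in linhas' with the trailing newline rule (linha != linhas[-1], a value comparison)
def pvA_lines : List (List Char) → List Char → Int → Bool → List Char → List (List Char) →
    Int × Bool × List Char × List (List Char)
  | [], _, soma, somando, cur, saida => (soma, somando, cur, saida)
  | linha :: rest, last, soma, somando, cur, saida =>
    match pvA_loop linha soma somando cur saida with
    | (soma', somando', cur', saida') =>
      pvA_lines rest last soma' somando'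
        (if linha ≠ last then cur' ++ ['\n'] else cur') saida'

def somador_on_off (texto : String) : String :=
  let linhas := PySem.Chars.splitOn texto.toList ['\n']  -- texto.split('\n'); always nonempty, so [-1] is getLast
  match pvA_lines linhas (linhas.getLastD []) 0 true [] [] with
  | (soma, _, cur, saida) =>
    let saida' := if cur ≠ [] then saida ++ [cur] else saida
    String.ofList (PySem.Chars.join ['\n'] (saida' ++ [pvA_out soma]))

-- ===== PORT B =====

-- f">> {soma}"
def pvB_out (soma : Int) : List Char := '>' :: '>' :: ' ' :: PySem.Int.toChars soma

-- re.finditer(r'(?i:off)|(?i:on)|[0-9]+|=|.', linha): leftmost match, alternatives in order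
def pvB_tokenize : List Char → List (List Char)
  | [] => []
  | c :: rest =>
    if ((c :: rest).take 3).map PySem.Chars.lowerChar = ['o', 'f', 'f'] then
      (c :: rest).take 3 :: pvB_tokenize ((c :: rest).drop 3)
    else if ((c :: rest).take 2).map PySem.Chars.lowerChar = ['o', 'n'] then
      (c :: rest).take 2 :: pvB_tokenize ((c :: rest).drop 2)
    else if h : PySem.Chars.isdigit c = true then
      (c :: rest).takeWhile PySem.Chars.isdigit
        :: pvB_tokenize ((c :: rest).dropWhile PySem.Chars.isdigit)
    else
      [c] :: pvB_tokenize rest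
  termination_by l => l.length
  decreasing_by
  all_goals have := List.length_dropWhile_le (p := PySem.Chars.isdigit) (l := rest)
  all_goals try simp [List.dropWhile_cons, h]
  all_goals try simp
  all_goals omega

-- dispatch on one token; tokens are nonempty, so t[0] = t.headD ' ' (exact here)
def pvB_step (st : Int × Bool × List Char × List (List Char)) (t : List Char) :
    Int × Bool × List Char × List (List Char) :=
  match st with
  | (soma, somando, cur, saida) =>
    let low := t.map PySem.Chars.lowerChar
    if low = ['o', 'f', 'f'] then (soma, false, cur ++ t, saida)
    else if low = ['o', 'n'] then (soma, true, cur ++ t, saida)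
    else if PySem.Chars.isdigit (t.headD ' ') then
      (if somando then soma + (PySem.Int.ofChars? t).getD 0 else soma, somando, cur ++ t, saida)
    else if t = ['='] then (soma, somando, [], saida ++ [cur ++ ['='], pvB_out soma])
    else (soma, somando, cur ++ t, saida)

def pvB_line (last : List Char) (st : Int × Bool × List Char × List (List Char))
    (linha : List Char) : Int × Bool × List Char × List (List Char) :=
  match (pvB_tokenize linha).foldl pvB_step st with
  | (soma, somando, cur, saida) =>
    (soma, somando, if linha ≠ last then cur ++ ['\n'] else cur, saida)

def somador_on_off_alt (texto : String) : String :=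
  let linhas := PySem.Chars.splitOn texto.toList ['\n']  -- texto.split('\n'); always nonempty, so [-1] is getLast
  match linhas.foldl (pvB_line (linhas.getLastD [])) (0, true, [], []) with
  | (soma, _, cur, saida) =>
    let saida' := if cur ≠ [] then saida ++ [cur] else saida
    String.ofList (PySem.Chars.join ['\n'] (saida' ++ [pvB_out soma]))

-- ===== PRECONDITION & SPEC =====
def Spec_somador_on_off (texto : String) (out : String) : Prop := out = somador_on_off_alt texto
instance (texto : String) (out : String) : Decidable (Spec_somador_on_off texto out) := by unfold Spec_somador_on_off; infer_instance

-- ===== CLAIM (what is proved, stated in full; the proofs are below) =====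
def Claim_equal_somador_on_off : Prop := ∀ (texto : String), Dom_somador_on_off texto → Spec_somador_on_off texto (somador_on_off texto)

-- ===== LEMMAS AND PROOFS =====

theorem pv_out_eq (s : Int) : pvA_out s = pvB_out s := rfl

theorem pv_lower_digit (c : Char) (h : PySem.Chars.isdigit c = true) :
    PySem.Chars.lowerChar c = c := by
  simp [PySem.Chars.isdigit, Char.le_def] at h
  simp [PySem.Chars.lowerChar, PySem.Chars.isupper, Char.le_def]
  intro h1 _
  simp [UInt32.le_iff_toNat_le] at h h1
  omega

theorem pv_digit_ne_o (c : Char) (h : PySem.Chars.isdigit c = true) : c ≠ 'o' := by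
  rintro rfl; exact absurd h (by decide)

theorem pv_digit_ne_eq (c : Char) (h : PySem.Chars.isdigit c = true) : c ≠ '=' := by
  rintro rfl; exact absurd h (by decide)

-- the 'off'/'on' tests at a position whose first char does not lower to 'o' fail
theorem pv_off_false {c : Char} (l : List Char) (h : PySem.Chars.lowerChar c ≠ 'o') :
    ¬ ((c :: l).take 3).map PySem.Chars.lowerChar = ['o', 'f', 'f'] := by
  intro heq
  simp [List.take_succ_cons] at heq
  exact h heq.1

theorem pv_on_false {c : Char} (l : List Char) (h : PySem.Chars.lowerChar c ≠ 'o') :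
    ¬ ((c :: l).take 2).map PySem.Chars.lowerChar = ['o', 'n'] := by
  intro heq
  simp [List.take_succ_cons] at heq
  exact h heq.1

theorem pv_cons_ne_off {c : Char} (l : List Char) (h : PySem.Chars.lowerChar c ≠ 'o') :
    ¬ (c :: l).map PySem.Chars.lowerChar = ['o', 'f', 'f'] := by
  intro heq; simp at heq; exact h heq.1

theorem pv_cons_ne_on {c : Char} (l : List Char) (h : PySem.Chars.lowerChar c ≠ 'o') :
    ¬ (c :: l).map PySem.Chars.lowerChar = ['o', 'n'] := by
  intro heq; simp at heq; exact h heq.1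

-- with somando = False A walks a digit run one char at a time; the net effect is appending the run
theorem pvA_loop_digits (r : List Char) (rest : List Char)
    (hr : ∀ c ∈ r, PySem.Chars.isdigit c = true) (soma : Int) (cur : List Char)
    (saida : List (List Char)) :
    pvA_loop (r ++ rest) soma false cur saida = pvA_loop rest soma false (cur ++ r) saida := by
  induction r generalizing cur with
  | nil => simp
  | cons d r' ih =>
    have hd : PySem.Chars.isdigit d = true := hr d (by simp)
    have hlo : PySem.Chars.lowerChar d = d := pv_lower_digit d hd
    have hno : PySem.Chars.lowerChar d ≠ 'o' := by rw [hlo]; exact pv_digit_ne_o d hd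
    rw [List.cons_append, pvA_loop]
    rw [if_neg (fun h => pv_off_false _ hno h.2),
        if_neg (fun h => pv_on_false _ hno h.2),
        dif_neg (fun h => Bool.false_ne_true h.1),
        if_neg (pv_digit_ne_eq d hd)]
    rw [ih (fun c hc => hr c (by simp [hc]))]
    simp

-- core: A's interleaved while-loop equals B's tokenize-then-fold, for every state
theorem pv_loop_eq_aux : ∀ (n : Nat) (l : List Char), l.length ≤ n →
    ∀ (soma : Int) (somando : Bool) (cur : List Char) (saida : List (List Char)),
    pvA_loop l soma somando cur saida = (pvB_tokenize l).foldl pvB_step (soma, somando, cur, saida) := by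
  intro n
  induction n with
  | zero =>
    intro l hl soma somando cur saida
    have : l = [] := List.eq_nil_of_length_eq_zero (Nat.le_zero.mp hl)
    subst this
    rw [pvA_loop, pvB_tokenize]
    rfl
  | succ n ih =>
    intro l hl soma somando cur saida
    match l with
    | [] => rw [pvA_loop, pvB_tokenize]; rfl
    | c :: rest =>
      by_cases hd : PySem.Chars.isdigit c = true
      · -- a digit position: both sides consume the maximal run
        have hlo : PySem.Chars.lowerChar c = c := pv_lower_digit c hd
        have hno : PySem.Chars.lowerChar c ≠ 'o' := by rw [hlo]; exact pv_digit_ne_o c hd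
        have hoff := pv_off_false (c := c) rest hno
        have hon := pv_on_false (c := c) rest hno
        have hrun : (c :: rest).takeWhile PySem.Chars.isdigit
            = c :: rest.takeWhile PySem.Chars.isdigit := by simp [hd]
        have hdrop : (c :: rest).dropWhile PySem.Chars.isdigit
            = rest.dropWhile PySem.Chars.isdigit := by simp [hd]
        have hlen : ((c :: rest).dropWhile PySem.Chars.isdigit).length ≤ n := by
          rw [hdrop]
          have := List.length_dropWhile_le (p := PySem.Chars.isdigit) (l := rest)
          simp at hl; omega
        -- B side: one token = the run
        rw [pvB_tokenize, if_neg hoff, if_neg hon, dif_pos hd, List.foldl_cons]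
        have hstep : pvB_step (soma, somando, cur, saida) ((c :: rest).takeWhile PySem.Chars.isdigit)
            = ((if somando then soma + (PySem.Int.ofChars? ((c :: rest).takeWhile PySem.Chars.isdigit)).getD 0 else soma),
               somando, cur ++ (c :: rest).takeWhile PySem.Chars.isdigit, saida) := by
          rw [pvB_step, hrun]
          rw [if_neg (pv_cons_ne_off _ hno), if_neg (pv_cons_ne_on _ hno)]
          simp only [List.headD_cons]
          rw [if_pos hd]
        rw [hstep]
        cases somando with
        | true =>
          rw [pvA_loop, if_neg (fun h => hoff h.2), if_neg (fun h => hon h.2),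
              dif_pos ⟨rfl, hd⟩, pvA_run_eq]
          exact ih _ hlen _ _ _ _
        | false =>
          have hsplit : (c :: rest).takeWhile PySem.Chars.isdigit
              ++ (c :: rest).dropWhile PySem.Chars.isdigit = c :: rest :=
            List.takeWhile_append_dropWhile
          conv_lhs => rw [← hsplit]
          rw [pvA_loop_digits _ _ (fun x hx => List.mem_takeWhile_imp hx)]
          rw [if_neg Bool.false_ne_true]
          exact ih _ hlen _ _ _ _
      · by_cases hoff : ((c :: rest).take 3).map PySem.Chars.lowerChar = ['o', 'f', 'f']
        · have h3 : 3 ≤ (c :: rest).length := by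
            have := congrArg List.length hoff
            simp only [List.length_map, List.length_take, List.length_cons] at this
            simp only [List.length_cons]
            omega
          have hlen : ((c :: rest).drop 3).length ≤ n := by
            simp only [List.length_drop, List.length_cons] at hl ⊢; omega
          rw [pvA_loop, if_pos ⟨h3, hoff⟩]
          rw [pvB_tokenize, if_pos hoff, List.foldl_cons]
          have hstep : pvB_step (soma, somando, cur, saida) ((c :: rest).take 3)
              = (soma, false, cur ++ (c :: rest).take 3, saida) := by
            rw [pvB_step]
            rw [if_pos hoff]
          rw [hstep]
          exact ih _ hlen _ _ _ _
        · by_cases hon : ((c :: rest).take 2).map PySem.Chars.lowerChar = ['o', 'n']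
          · have h2 : 2 ≤ (c :: rest).length := by
              have := congrArg List.length hon
              simp only [List.length_map, List.length_take, List.length_cons] at this
              simp only [List.length_cons]
              omega
            have hlen : ((c :: rest).drop 2).length ≤ n := by
              simp only [List.length_drop, List.length_cons] at hl ⊢; omega
            rw [pvA_loop, if_neg (fun h => hoff h.2), if_pos ⟨h2, hon⟩]
            rw [pvB_tokenize, if_neg hoff, if_pos hon, List.foldl_cons]
            have hstep : pvB_step (soma, somando, cur, saida) ((c :: rest).take 2)
                = (soma, true, cur ++ (c :: rest).take 2, saida) := by
              rw [pvB_step]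
              have hoff2 : ¬ ((c :: rest).take 2).map PySem.Chars.lowerChar = ['o', 'f', 'f'] := by
                intro hco
                have := congrArg List.length hco
                simp only [List.length_map, List.length_take, List.length_cons] at this
                omega
              rw [if_neg hoff2, if_pos hon]
            rw [hstep]
            exact ih _ hlen _ _ _ _
          · have hlen : rest.length ≤ n := by simp at hl; omega
            have hA : pvA_loop (c :: rest) soma somando cur saida
                = if c = '=' then pvA_loop rest soma somando [] (saida ++ [cur ++ ['='], pvA_out soma])
                  else pvA_loop rest soma somando (cur ++ [c]) saida := by
              rw [pvA_loop, if_neg (fun h => hoff h.2), if_neg (fun h => hon h.2),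
                  dif_neg (fun h => hd h.2)]
            rw [hA, pvB_tokenize, if_neg hoff, if_neg hon, dif_neg hd, List.foldl_cons]
            have hlow1 : ¬ ([c].map PySem.Chars.lowerChar = ['o', 'f', 'f']) := by
              intro h; have := congrArg List.length h; simp at this
            have hlow2 : ¬ ([c].map PySem.Chars.lowerChar = ['o', 'n']) := by
              intro h; have := congrArg List.length h; simp at this
            have hstep : pvB_step (soma, somando, cur, saida) [c]
                = if c = '=' then (soma, somando, [], saida ++ [cur ++ ['='], pvB_out soma])
                  else (soma, somando, cur ++ [c], saida) := by
              rw [pvB_step]; simp only [List.headD_cons]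
              rw [if_neg hlow1, if_neg hlow2, if_neg hd]
              by_cases heq : c = '='
              · subst heq; simp
              · rw [if_neg (by simpa using heq), if_neg heq]
            rw [hstep]
            by_cases heq : c = '='
            · rw [if_pos heq, if_pos heq, pv_out_eq]
              exact ih _ hlen _ _ _ _
            · rw [if_neg heq, if_neg heq]
              exact ih _ hlen _ _ _ _

theorem pv_loop_eq (l : List Char) (soma : Int) (somando : Bool) (cur : List Char)
    (saida : List (List Char)) :
    pvA_loop l soma somando cur saida = (pvB_tokenize l).foldl pvB_step (soma, somando, cur, saida) :=
  pv_loop_eq_aux l.length l le_rfl soma somando cur saida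

theorem pv_lines_eq (linhas : List (List Char)) (last : List Char) :
    ∀ (soma : Int) (somando : Bool) (cur : List Char) (saida : List (List Char)),
    pvA_lines linhas last soma somando cur saida
      = linhas.foldl (pvB_line last) (soma, somando, cur, saida) := by
  induction linhas with
  | nil => intro soma somando cur saida; rfl
  | cons linha rest ih =>
    intro soma somando cur saida
    rw [pvA_lines, pv_loop_eq, List.foldl_cons]
    rcases hF : (pvB_tokenize linha).foldl pvB_step (soma, somando, cur, saida) with ⟨a, b, c, d⟩
    rw [pvB_line, hF]
    exact ih _ _ _ _

-- ===== VERDICT (by name: the statement is the Claim_ definition above) =====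
theorem somador_on_off_spec : Claim_equal_somador_on_off := by
  unfold Claim_equal_somador_on_off
  intro texto _
  unfold Spec_somador_on_off somador_on_off somador_on_off_alt
  simp only [pv_lines_eq, pv_out_eq]
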